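-- pv_equiv track=rewrite | github.com/dtunkelang/bag-of-documents | utils.py | generate_keyword_combos
-- ===== SOURCE A (Python) =====
-- from itertools import combinations
--
-- def generate_keyword_combos(words, max_relaxation_combos=3):
--     """Generate keyword combinations for tantivy AND-matching with relaxation.
--
--     Tries full AND first, then drops words one at a time, returning the
--     longest combos first. Returns a list of (n_required, combos) pairs.
--     """
--     if not words:
--         return []
--     result = []
--     for n_required in range(len(words), 0, -1):
--         if n_required == len(words):
--             combos = [words]
--         else:
--             combos = [list(c) for c in combinations(words, n_required)]
--             combos.sort(key=lambda c: -sum(len(w) for w in c))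
--             combos = combos[:max_relaxation_combos]
--         result.append((n_required, combos))
--     return result
-- ===== SOURCE B (Python) =====
-- def _get(lst, i):
--     """lst[i] if in range, else []."""
--     return lst[i] if 0 <= i < len(lst) else []
--
-- def generate_keyword_combos(words, max_relaxation_combos=3):
--     """Same result as A, but all combination levels are built in one
--     Pascal-triangle DP pass over the words instead of a fresh
--     itertools.combinations enumeration per level."""
--     if not words:
--         return []
--     # by_size[r] = all size-r combinations of the processed suffix,
--     # in itertools.combinations (lexicographic-by-index) order.
--     by_size = [[[]]]
--     for w in reversed(words):
--         new = [[[]]]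
--         for r in range(1, len(by_size) + 1):
--             new.append([[w] + c for c in _get(by_size, r - 1)] + _get(by_size, r))
--         by_size = new
--     result = [(len(words), [list(words)])]
--     for n in range(len(words) - 1, 0, -1):
--         combos = sorted(by_size[n], key=lambda c: -sum(len(w) for w in c))
--         result.append((n, combos[:max_relaxation_combos]))
--     return result
-- ===== Notes on version B (the rewrite author's own statement) =====
-- stated objective: alternative
-- what changed: Instead of calling itertools.combinations afresh for every relaxation level, B builds all combination levels at once in a single Pascal-triangle DP pass over the words (each level assembled from the previous suffix table), then sorts/slices each level.
import Mathlib
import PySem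

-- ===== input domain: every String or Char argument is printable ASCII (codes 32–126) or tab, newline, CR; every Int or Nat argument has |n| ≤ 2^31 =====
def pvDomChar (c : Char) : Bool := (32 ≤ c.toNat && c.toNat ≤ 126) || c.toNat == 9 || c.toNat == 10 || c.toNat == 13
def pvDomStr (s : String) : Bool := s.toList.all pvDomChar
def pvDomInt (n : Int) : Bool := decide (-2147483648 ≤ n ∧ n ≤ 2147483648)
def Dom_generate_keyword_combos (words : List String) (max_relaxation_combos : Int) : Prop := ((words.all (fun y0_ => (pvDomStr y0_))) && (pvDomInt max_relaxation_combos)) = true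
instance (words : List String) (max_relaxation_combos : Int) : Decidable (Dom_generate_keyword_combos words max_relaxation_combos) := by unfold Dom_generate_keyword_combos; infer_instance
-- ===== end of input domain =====

-- B replaces the per-level itertools.combinations enumeration of A by one Pascal-triangle
-- DP pass building all combination levels at once (objective: alternative, not timed faster).

-- ===== PORT A =====
-- itertools.combinations(words, r) in its documented lexicographic-by-index order
def pyCombinations : List String → Nat → List (List String)
  | _, 0 => [[]]
  | [], _+1 => []
  | x :: xs, r+1 => (pyCombinations xs r).map (fun c => x :: c) ++ pyCombinations xs (r+1)

def generate_keyword_combos (words : List String) (max_relaxation_combos : Int) : List (Int × List (List String)) :=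
  if words = [] then []
  else
    (PySem.List.pyRange (PySem.List.len words) 0 (-1)).foldl
      (fun result n_required =>
        let combos :=
          if n_required = PySem.List.len words then [words]
          else
            -- [list(c) for c in combinations] copies each tuple; as values this is the list itself
            PySem.List.slice
              (PySem.List.sorted (pyCombinations words n_required.toNat)
                (fun c => -((c.map PySem.Str.len).sum)) false)
              none (some max_relaxation_combos)
        result ++ [(n_required, combos)]) []

-- ===== PORT B =====
-- _get(lst, i) from Source B
def pvGetOrNil (lst : List (List (List String))) (i : Int) : List (List String) :=
  if 0 ≤ i ∧ i < PySem.List.len lst then PySem.List.pyGetD lst i [] else []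

-- the inner loop of Source B: one Pascal step adding word w in front of a suffix table
def pvStepDP (bs : List (List (List String))) (w : String) : List (List (List String)) :=
  (PySem.List.pyRange 1 (PySem.List.len bs + 1) 1).foldl
    (fun new r => new ++ [((pvGetOrNil bs (r - 1)).map (fun c => w :: c)) ++ pvGetOrNil bs r])
    [[[]]]

def generate_keyword_combos_alt (words : List String) (max_relaxation_combos : Int) : List (Int × List (List String)) :=
  if words = [] then []
  else
    let by_size := words.reverse.foldl pvStepDP [[[]]]
    ((words.length : Int), [words]) ::
      (PySem.List.pyRange ((words.length : Int) - 1) 0 (-1)).map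
        (fun n =>
          (n, PySem.List.slice
                (PySem.List.sorted (PySem.List.pyGetD by_size n [])
                  (fun c => -((c.map PySem.Str.len).sum)) false)
                none (some max_relaxation_combos)))

-- ===== PRECONDITION & SPEC =====
def Spec_generate_keyword_combos (words : List String) (max_relaxation_combos : Int) (out : List (Int × List (List String))) : Prop := out = generate_keyword_combos_alt words max_relaxation_combos
instance (words : List String) (max_relaxation_combos : Int) (out : List (Int × List (List String))) : Decidable (Spec_generate_keyword_combos words max_relaxation_combos out) := by unfold Spec_generate_keyword_combos; infer_instance

-- ===== CLAIM (what is proved, stated in full; the proofs are below) =====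
def Claim_equal_generate_keyword_combos : Prop := ∀ (words : List String) (max_relaxation_combos : Int), Dom_generate_keyword_combos words max_relaxation_combos → Spec_generate_keyword_combos words max_relaxation_combos (generate_keyword_combos words max_relaxation_combos)

-- ===== LEMMAS AND PROOFS =====

-- combinations of more elements than available: none
theorem pyCombinations_nil_of_gt (ws : List String) (r : Nat) (h : ws.length < r) :
    pyCombinations ws r = [] := by
  induction ws generalizing r with
  | nil => cases r with
    | zero => omega
    | succ r => rfl
  | cons w ws ih =>
    cases r with
    | zero => omega
    | succ r =>
      simp only [pyCombinations]
      rw [ih r (by simpa using h), ih (r+1) (by simp at h ⊢; omega)]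
      simp

def pvDP (ws : List String) : List (List (List String)) :=
  ws.foldr (fun w bs => pvStepDP bs w) [[[]]]

theorem pvStepDP_eq (bs : List (List (List String))) (w : String) :
    pvStepDP bs w = [[[]]] ++ (List.range bs.length).map
      (fun k : Nat => ((pvGetOrNil bs (1 + (k : Int) - 1)).map (fun c => w :: c)) ++ pvGetOrNil bs (1 + (k : Int))) := by
  unfold pvStepDP
  rw [PySem.List.foldl_append_singleton_eq_map]
  congr 1
  rw [PySem.List.len_eq, PySem.List.pyRange_one 1 ((bs.length : Int) + 1)]
  rw [show ((bs.length : Int) + 1 - 1).toNat = bs.length by omega]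
  rw [List.map_map]
  rfl

theorem pvGetOrNil_natCast (bs : List (List (List String))) (j : Nat) :
    pvGetOrNil bs (j : Int) = bs.getD j [] := by
  unfold pvGetOrNil
  by_cases h : j < bs.length
  · rw [if_pos (by refine ⟨by simp, ?_⟩; simp [PySem.List.len_eq]; omega)]
    simp
  · rw [if_neg (by simp [PySem.List.len_eq]; omega)]
    rw [List.getD_eq_getElem?_getD, List.getElem?_eq_none (by omega)]
    rfl

theorem pvDP_getD (ws : List String) (r : Nat) :
    (pvDP ws).getD r [] = pyCombinations ws r := by
  induction ws generalizing r with
  | nil =>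
    cases r with
    | zero => rfl
    | succ r => rfl
  | cons w ws ih =>
    show (pvStepDP (pvDP ws) w).getD r [] = _
    rw [pvStepDP_eq]
    cases r with
    | zero => rfl
    | succ j =>
      simp only [List.cons_append, List.nil_append, List.getD_cons_succ]
      by_cases hj : j < (pvDP ws).length
      · rw [List.getD_eq_getElem?_getD, List.getElem?_map, List.getElem?_range hj]
        simp only [Option.map_some, Option.getD_some]
        rw [show ((1 : Int) + (j : Int) - 1) = (j : Int) by ring,
            show ((1 : Int) + (j : Int)) = ((j + 1 : Nat) : Int) by push_cast; ring]
        rw [pvGetOrNil_natCast, pvGetOrNil_natCast, ih j, ih (j + 1)]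
        rfl
      · rw [List.getD_eq_getElem?_getD, List.getElem?_eq_none (by simpa using hj)]
        have hlen : (pvDP ws).length = ws.length + 1 := by
          clear ih hj
          induction ws with
          | nil => rfl
          | cons w' ws' ih' =>
            show (pvStepDP (pvDP ws') w').length = _
            rw [pvStepDP_eq]
            simp [ih']
        rw [hlen] at hj
        rw [pyCombinations_nil_of_gt _ _ (by simp only [List.length_cons]; omega)]
        rfl

-- ===== VERDICT (by name: the statement is the Claim_ definition above) =====
theorem generate_keyword_combos_spec : Claim_equal_generate_keyword_combos := by
  intro words k _
  unfold Spec_generate_keyword_combos generate_keyword_combos generate_keyword_combos_alt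
  by_cases hw : words = []
  · simp [hw]
  · rw [if_neg hw, if_neg hw]
    have hL : 0 < (words.length : Int) := by
      cases words with
      | nil => exact absurd rfl hw
      | cons a l => simp
    rw [PySem.List.len_eq]
    rw [PySem.List.pyRange_neg_one_cons hL]
    rw [List.foldl_cons, PySem.List.foldl_append_singleton_eq_map]
    rw [if_pos rfl]
    show [((words.length : Int), [words])] ++ _ = _ :: _
    rw [List.singleton_append]
    congr 1
    rw [show words.reverse.foldl pvStepDP [[[]]] = pvDP words from List.foldl_reverse ..]
    apply List.map_congr_left
    intro n hn
    rw [PySem.List.mem_pyRange_neg_one] at hn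
    rw [if_neg (by omega)]
    have hcast : ((n.toNat : Nat) : Int) = n := by omega
    rw [← hcast, PySem.List.pyGetD_natCast, pvDP_getD, Int.toNat_natCast]
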